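-- pv_equiv track=rewrite | github.com/poxiao-array/ASCD | result/Yang/main.py | bytecode_to_opcode
-- ===== SOURCE A (Python) =====
-- def bytecode_to_opcode(bytecode):
--     opcode_list = []
--     i = 0
--     while i < len(bytecode):
--         if bytecode[i:i+2] == '60':  # PUSH1 指令
--             opcode_list.append('PUSH')
--             i += 4  # PUSH1 后接一个字节（两位十六进制）
--         else:
--             opcode_list.append(bytecode[i:i+2])
--             i += 2
--     return opcode_list
-- ===== SOURCE B (Python) =====
-- def bytecode_to_opcode(bytecode):
--     pairs = [bytecode[i:i+2] for i in range(0, len(bytecode), 2)]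
--     opcode_list = []
--     skip = False
--     for p in pairs:
--         if skip:
--             skip = False
--             continue
--         if p == '60':
--             opcode_list.append('PUSH')
--             skip = True
--         else:
--             opcode_list.append(p)
--     return opcode_list
-- ===== Notes on version B (the rewrite author's own statement) =====
-- stated objective: alternative
-- what changed: Replaces A's while-loop that mutates an index by 2 or 4 over the raw string with a pre-chunking pass into two-char pairs followed by a single scan that threads the PUSH-data skip through a boolean state flag.
import Mathlib
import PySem

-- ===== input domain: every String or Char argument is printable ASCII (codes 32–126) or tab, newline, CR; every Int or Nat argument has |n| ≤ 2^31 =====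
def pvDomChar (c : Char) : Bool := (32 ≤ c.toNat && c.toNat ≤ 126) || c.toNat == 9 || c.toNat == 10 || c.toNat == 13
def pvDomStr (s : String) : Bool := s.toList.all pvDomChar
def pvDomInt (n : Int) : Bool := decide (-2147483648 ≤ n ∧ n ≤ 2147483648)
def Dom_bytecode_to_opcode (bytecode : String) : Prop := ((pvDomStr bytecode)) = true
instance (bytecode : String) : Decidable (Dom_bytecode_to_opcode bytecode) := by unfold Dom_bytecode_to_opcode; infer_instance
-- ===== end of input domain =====

-- B re-decomposes A's index-stepping while-loop as pre-chunked two-char pairs scanned with a skip flag (alternative decomposition, same cost).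

-- ===== PORT A =====
-- A's while-loop: index i stepped by 2, or by 4 after a '60' chunk; bytecode[i:i+2] is a Python slice.
def pvLoopA (cs : List Char) (i : Nat) : List String :=
  if _h : i < cs.length then
    if String.ofList (PySem.List.slice cs (some (i : Int)) (some ((i : Int) + 2))) = "60" then
      "PUSH" :: pvLoopA cs (i + 4)
    else
      String.ofList (PySem.List.slice cs (some (i : Int)) (some ((i : Int) + 2))) :: pvLoopA cs (i + 2)
  else []
termination_by cs.length - i

def bytecode_to_opcode (bytecode : String) : List String :=
  pvLoopA bytecode.toList 0

-- ===== PORT B =====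
-- pairs = [bytecode[i:i+2] for i in range(0, len(bytecode), 2)]  (two-char chunks, last may be one char)
def pvChunk2 : List Char → List String
  | [] => []
  | [c] => [String.ofList [c]]
  | c1 :: c2 :: rest => String.ofList [c1, c2] :: pvChunk2 rest

-- the for-loop over pairs with the skip flag
def pvScan : List String → Bool → List String
  | [], _ => []
  | p :: ps, skip =>
    if skip then pvScan ps false
    else if p = "60" then "PUSH" :: pvScan ps true
    else p :: pvScan ps false

def bytecode_to_opcode_alt (bytecode : String) : List String :=
  pvScan (pvChunk2 bytecode.toList) false

-- ===== PRECONDITION & SPEC =====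
def Spec_bytecode_to_opcode (bytecode : String) (out : List String) : Prop := out = bytecode_to_opcode_alt bytecode
instance (bytecode : String) (out : List String) : Decidable (Spec_bytecode_to_opcode bytecode out) := by unfold Spec_bytecode_to_opcode; infer_instance

-- ===== CLAIM (what is proved, stated in full; the proofs are below) =====
def Claim_equal_bytecode_to_opcode : Prop := ∀ (bytecode : String), Dom_bytecode_to_opcode bytecode → Spec_bytecode_to_opcode bytecode (bytecode_to_opcode bytecode)

-- ===== LEMMAS AND PROOFS =====

-- a pending skip consumes exactly the first pair, i.e. the first two characters
lemma pvScan_chunk2_true (l : List Char) :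
    pvScan (pvChunk2 l) true = pvScan (pvChunk2 (l.drop 2)) false := by
  match l with
  | [] => rfl
  | [c] => rfl
  | c1 :: c2 :: rest => simp [pvChunk2, pvScan]

lemma pvLoopA_eq (cs : List Char) (i : Nat) :
    pvLoopA cs i = pvScan (pvChunk2 (cs.drop i)) false := by
  by_cases h : i < cs.length
  · have hslice : PySem.List.slice cs (some (i : Int)) (some ((i : Int) + 2)) = (cs.drop i).take 2 := by
      have := PySem.List.slice_natCast_add cs i 2
      simpa using this
    have hdrop2 : cs.drop (i + 2) = (cs.drop i).drop 2 := by
      rw [List.drop_drop]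
    have hdrop4 : cs.drop (i + 4) = ((cs.drop i).drop 2).drop 2 := by
      rw [List.drop_drop, List.drop_drop]
    match ht : cs.drop i with
    | [] =>
      exfalso
      have := List.length_drop (l := cs) (i := i)
      rw [ht] at this
      simp at this
      omega
    | [c] =>
      have h2 : cs.drop (i + 2) = [] := by rw [hdrop2, ht]; rfl
      have hne : String.ofList [c] ≠ "60" := by
        intro hc
        have h' := congrArg String.toList hc
        simp at h'
      rw [pvLoopA]
      rw [dif_pos h, hslice, ht]
      simp only [List.take]
      rw [if_neg (by simpa using hne)]
      rw [pvLoopA_eq cs (i + 2), h2]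
      simp [pvChunk2, pvScan, hne]
    | c1 :: c2 :: rest =>
      have h2 : cs.drop (i + 2) = rest := by rw [hdrop2, ht]; rfl
      have h4 : cs.drop (i + 4) = rest.drop 2 := by rw [hdrop4, ht]; rfl
      rw [pvLoopA]
      rw [dif_pos h, hslice, ht]
      simp only [List.take]
      by_cases h60 : String.ofList [c1, c2] = "60"
      · rw [if_pos h60]
        rw [pvLoopA_eq cs (i + 4), h4]
        simp [pvChunk2, pvScan, h60, pvScan_chunk2_true rest]
      · rw [if_neg h60]
        rw [pvLoopA_eq cs (i + 2), h2]
        simp [pvChunk2, pvScan, h60]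
  · have hd : cs.drop i = [] := List.drop_eq_nil_of_le (by omega)
    rw [pvLoopA, dif_neg h, hd]
    rfl
termination_by cs.length - i

-- ===== VERDICT (by name: the statement is the Claim_ definition above) =====
theorem bytecode_to_opcode_spec : Claim_equal_bytecode_to_opcode := by
  intro bytecode _
  unfold Spec_bytecode_to_opcode bytecode_to_opcode bytecode_to_opcode_alt
  simpa using pvLoopA_eq bytecode.toList 0
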